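-- pv_equiv track=rewrite | github.com/sk-trade/crypto-rank-tracker | common/sector_loader.py | process_sector_data
-- ===== SOURCE A (Python) =====
-- from typing import Dict, List, Tuple
--
-- def process_sector_data(
--     raw_map: Dict[str, List[str]]
-- ) -> Tuple[Dict[str, List[str]], Dict[str, List[str]]]:
--     """로드한 원본 데이터를 정방향/역방향 맵으로 가공합니다."""
--     sectors: Dict[str, List[str]] = {}
--     reverse_map = raw_map
--
--     for market, tags in raw_map.items():
--         for tag in tags:
--             simple_tag = tag.split("(")[0].strip()
--             if simple_tag not in sectors:
--                 sectors[simple_tag] = []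
--             sectors[simple_tag].append(market)
--
--     return sectors, reverse_map
-- ===== SOURCE B (Python) =====
-- def process_sector_data(raw_map):
--     """Flatten to (simple_tag, market) pairs, then build each sector's market
--     list in one comprehension per first-seen tag (different decomposition)."""
--     pairs = [(tag.split("(")[0].strip(), market)
--              for market, tags in raw_map.items()
--              for tag in tags]
--     keys = dict.fromkeys(t for t, _ in pairs)
--     sectors = {t: [m for tt, m in pairs if tt == t] for t in keys}
--     return sectors, raw_map
-- ===== Notes on version B (the rewrite author's own statement) =====
-- stated objective: alternative
-- what changed: Replaces A's incremental dict-grouping nested loop with a flatten-to-pairs pass followed by an ordered dedup of tags and one per-tag comprehension that collects that tag's markets.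
import Mathlib
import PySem

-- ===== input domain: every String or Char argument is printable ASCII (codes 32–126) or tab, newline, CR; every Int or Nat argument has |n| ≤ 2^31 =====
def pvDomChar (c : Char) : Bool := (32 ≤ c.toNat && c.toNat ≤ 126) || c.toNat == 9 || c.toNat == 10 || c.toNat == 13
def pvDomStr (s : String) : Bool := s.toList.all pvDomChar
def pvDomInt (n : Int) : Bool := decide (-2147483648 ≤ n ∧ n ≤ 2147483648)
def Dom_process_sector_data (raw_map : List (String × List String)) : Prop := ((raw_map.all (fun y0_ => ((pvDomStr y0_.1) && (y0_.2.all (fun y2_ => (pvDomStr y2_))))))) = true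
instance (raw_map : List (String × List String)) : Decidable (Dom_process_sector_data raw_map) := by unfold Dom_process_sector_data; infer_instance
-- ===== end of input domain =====

-- B replaces A's incremental dict-grouping loop by flatten-to-pairs + ordered tag dedup + one per-tag collection pass (alternative decomposition, same results).


-- ===== PORT A =====
-- tag.split("(")[0].strip() — shared by both sources verbatim ('[0]' is always in range: split with a nonempty sep returns a nonempty list)
def pvSimpleTag (tag : String) : String :=
  PySem.Str.strip (PySem.List.pyGetD ((PySem.Str.split? tag "(").getD []) 0 "")

def process_sector_data (raw_map : List (String × List String)) : (List (String × List String)) × (List (String × List String)) :=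
  let sectors := raw_map.foldl (fun d mk =>
    mk.2.foldl (fun d tag =>
      let simple_tag := pvSimpleTag tag
      let d := if d.contains simple_tag then d else d.insert simple_tag []
      d.modify simple_tag [] (fun l => l ++ [mk.1])) d)
    (PySem.Dict.empty : PySem.Dict String (List String))
  (sectors.items, raw_map)

-- ===== PORT B =====
def process_sector_data_alt (raw_map : List (String × List String)) : (List (String × List String)) × (List (String × List String)) :=
  let pairs := raw_map.flatMap (fun mk => mk.2.map (fun tag => (pvSimpleTag tag, mk.1)))
  let keys := PySem.List.dedup (pairs.map (fun p => p.1))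
  (keys.map (fun t => (t, (pairs.filter (fun p => p.1 == t)).map (fun p => p.2))), raw_map)

-- ===== PRECONDITION & SPEC =====
def Spec_process_sector_data (raw_map : List (String × List String)) (out : (List (String × List String)) × (List (String × List String))) : Prop := out = process_sector_data_alt raw_map
instance (raw_map : List (String × List String)) (out : (List (String × List String)) × (List (String × List String))) : Decidable (Spec_process_sector_data raw_map out) := by unfold Spec_process_sector_data; infer_instance

-- ===== CLAIM (what is proved, stated in full; the proofs are below) =====
def Claim_equal_process_sector_data : Prop := ∀ (raw_map : List (String × List String)), Dom_process_sector_data raw_map → Spec_process_sector_data raw_map (process_sector_data raw_map)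

-- ===== LEMMAS AND PROOFS =====

-- A's "if absent, insert []; then append" is one modify-with-default step
theorem pvStep_eq (d : PySem.Dict String (List String)) (t m : String) :
    (if d.contains t then d else d.insert t []).modify t [] (fun l => l ++ [m])
      = d.modify t [] (fun l => l ++ [m]) := by
  by_cases h : d.contains t = true
  · rw [if_pos h]
  · rw [if_neg h]
    simp only [PySem.Dict.modify, PySem.Dict.getD_insert_self,
      PySem.Dict.insert_insert_self, PySem.Dict.getD_of_not_contains d [] (by simpa using h)]

-- A's nested loop over raw_map is the flat fold over B's pair list
theorem pvFoldFlat (raw_map : List (String × List String)) (init : PySem.Dict String (List String)) :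
    (raw_map.flatMap (fun mk => mk.2.map (fun tag => (pvSimpleTag tag, mk.1)))).foldl
        (fun d p => d.modify p.1 [] (fun l => l ++ [p.2])) init
      = raw_map.foldl (fun d mk =>
          mk.2.foldl (fun d tag => d.modify (pvSimpleTag tag) [] (fun l => l ++ [mk.1])) d) init := by
  induction raw_map generalizing init with
  | nil => rfl
  | cons mk rest ih =>
      simp [List.flatMap_cons, List.foldl_append, List.foldl_map, ih]

-- ===== VERDICT (by name: the statement is the Claim_ definition above) =====
theorem process_sector_data_spec : Claim_equal_process_sector_data := by
  intro raw_map _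
  unfold Spec_process_sector_data process_sector_data process_sector_data_alt
  have houter : (fun (d : PySem.Dict String (List String)) (mk : String × List String) =>
        mk.2.foldl (fun d tag =>
          (if d.contains (pvSimpleTag tag) then d else d.insert (pvSimpleTag tag) []).modify
            (pvSimpleTag tag) [] (fun l => l ++ [mk.1])) d)
      = (fun d mk => mk.2.foldl (fun d tag =>
          d.modify (pvSimpleTag tag) [] (fun l => l ++ [mk.1])) d) := by
    funext d mk
    congr 1
    funext d t
    exact pvStep_eq d (pvSimpleTag t) mk.1
  set L := raw_map.flatMap (fun mk => mk.2.map (fun tag => (pvSimpleTag tag, mk.1))) with hL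
  have hnodup : (L.foldl (fun d p => d.modify p.1 [] (fun l => l ++ [p.2])) PySem.Dict.empty).keys.Nodup :=
    PySem.Dict.nodup_keys_foldl_modify_key L Prod.fst [] (fun _ p => fun l => l ++ [p.2]) _ PySem.Dict.nodup_keys_empty
  have hkeys : (L.foldl (fun d p => d.modify p.1 [] (fun l => l ++ [p.2])) PySem.Dict.empty).keys
      = PySem.List.dedup (L.map (fun p => p.1)) := by
    rw [PySem.Dict.keys_foldl_modify_key L Prod.fst [] (fun _ p => fun l => l ++ [p.2]) PySem.Dict.empty]
    rfl
  have hItems : (raw_map.foldl (fun d mk =>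
        mk.2.foldl (fun d tag =>
          (if d.contains (pvSimpleTag tag) then d else d.insert (pvSimpleTag tag) []).modify
            (pvSimpleTag tag) [] (fun l => l ++ [mk.1])) d)
        (PySem.Dict.empty : PySem.Dict String (List String))).items
      = (PySem.List.dedup (L.map (fun p => p.1))).map
          (fun t => (t, (L.filter (fun p => p.1 == t)).map (fun p => p.2))) := by
    rw [houter, ← pvFoldFlat raw_map PySem.Dict.empty, ← hL,
      PySem.Dict.items_eq_map_keys _ hnodup [], hkeys]
    refine List.map_congr_left (fun k _ => ?_)
    rw [PySem.Dict.getD_foldl_modify_append L PySem.Dict.empty k]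
    simp
  exact Prod.ext_iff.mpr ⟨hItems, rfl⟩
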